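-- pv_equiv track=rewrite | github.com/fdorssers/advent-of-code | aoc_2023/src/day02.py | task01
-- ===== SOURCE A (Python) =====
-- def task01(data: list[list[dict[str, int]]]) -> int:
--     total = {"red": 12, "green": 13, "blue": 14}
--     return sum(
--         [
--             game_num
--             for game_num, game in enumerate(data, 1)
--             if all([count <= total[color] for hand in game for color, count in hand.items()])
--         ]
--     )
-- ===== SOURCE B (Python) =====
-- def task01(data: list[list[dict[str, int]]]) -> int:
--     def limit(color):
--         if color == "red":
--             return 12
--         if color == "green":
--             return 13
--         if color == "blue":
--             return 14
--         raise KeyError(color)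
--
--     def hand_ok(items):
--         if not items:
--             return True
--         (color, count), rest = items[0], items[1:]
--         if count > limit(color):
--             return False
--         return hand_ok(rest)
--
--     def game_ok(hands):
--         if not hands:
--             return True
--         if hand_ok(list(hands[0].items())):
--             return game_ok(hands[1:])
--         return False
--
--     def go(games, idx):
--         if not games:
--             return 0
--         rest = go(games[1:], idx + 1)
--         return rest + idx if game_ok(games[0]) else rest
--
--     return go(data, 1)
-- ===== Notes on version B (the rewrite author's own statement) =====
-- stated objective: alternative
-- what changed: B replaces A's dict lookup and flattened list comprehension with recursive descent: an if-chain limit function per color, short-circuiting recursive validity checks per hand and per game, and structural recursion over the games carrying the 1-based index.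
import Mathlib
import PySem

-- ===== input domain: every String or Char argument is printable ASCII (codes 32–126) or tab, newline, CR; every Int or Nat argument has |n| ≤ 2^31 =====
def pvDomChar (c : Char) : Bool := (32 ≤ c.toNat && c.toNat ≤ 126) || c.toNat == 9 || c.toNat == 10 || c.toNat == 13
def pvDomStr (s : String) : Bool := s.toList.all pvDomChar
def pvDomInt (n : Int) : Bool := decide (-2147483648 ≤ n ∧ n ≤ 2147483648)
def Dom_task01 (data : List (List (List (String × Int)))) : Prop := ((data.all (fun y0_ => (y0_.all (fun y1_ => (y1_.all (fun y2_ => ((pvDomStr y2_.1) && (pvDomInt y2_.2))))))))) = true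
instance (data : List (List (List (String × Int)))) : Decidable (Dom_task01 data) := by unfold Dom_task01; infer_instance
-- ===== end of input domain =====

-- B replaces A's dict lookup and flattened comprehension with recursive descent: an if-chain
-- limit per color and short-circuiting structural recursion over hands, colors and games
-- (alternative; same cost).


-- ===== PORT A =====
def task01 (data : List (List (List (String × Int)))) : Int :=
  let total : PySem.Dict String Int := PySem.Dict.ofList [("red", 12), ("green", 13), ("blue", 14)]
  ((PySem.List.enumerate data 1).filter (fun p =>
      (p.2.flatMap (fun hand => hand.map (fun ci => decide (ci.2 ≤ total.getD ci.1 0)))).all id)).foldl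
    (fun s p => s + p.1) 0

-- ===== PORT B =====
-- limit raises KeyError on an unknown color in Python; such inputs are outside Pre_task01,
-- so the port returns 0 there (the branch is never reached inside Pre_).
def pvLimit (color : String) : Int :=
  if color == "red" then 12
  else if color == "green" then 13
  else if color == "blue" then 14
  else 0

def pvHandOk : List (String × Int) → Bool
  | [] => true
  | ci :: rest => if ci.2 > pvLimit ci.1 then false else pvHandOk rest

def pvGameOk : List (List (String × Int)) → Bool
  | [] => true
  | hand :: rest => if pvHandOk hand then pvGameOk rest else false

def pvGo : List (List (List (String × Int))) → Int → Int
  | [], _ => 0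
  | game :: games, idx =>
      let rest := pvGo games (idx + 1)
      if pvGameOk game then rest + idx else rest

def task01_alt (data : List (List (List (String × Int)))) : Int :=
  pvGo data 1

-- ===== PRECONDITION & SPEC =====
-- Pre_ excludes exactly the inputs on which Python A raises KeyError: some hand mentions a
-- color other than "red"/"green"/"blue".
def Pre_task01 (data : List (List (List (String × Int)))) : Prop :=
  ∀ game ∈ data, ∀ hand ∈ game, ∀ ci ∈ hand, ci.1 = "red" ∨ ci.1 = "green" ∨ ci.1 = "blue"
instance (data : List (List (List (String × Int)))) : Decidable (Pre_task01 data) := by unfold Pre_task01; infer_instance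
def pvWitness_task01 : (List (List (List (String × Int)))) :=
  [[[("red", 3), ("blue", 2)], [("green", 13)]], [[("red", 20)]]]
def Spec_task01 (data : List (List (List (String × Int)))) (out : Int) : Prop := out = task01_alt data
instance (data : List (List (List (String × Int)))) (out : Int) : Decidable (Spec_task01 data out) := by unfold Spec_task01; infer_instance

-- ===== CLAIM (what is proved, stated in full; the proofs are below) =====
def Claim_equal_task01 : Prop := ∀ (data : List (List (List (String × Int)))), Dom_task01 data → Pre_task01 data → Spec_task01 data (task01 data)

-- ===== LEMMAS AND PROOFS =====

-- A's per-count check equals B's: the dict's default-0 lookup coincides with pvLimit on every string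
theorem pv_limit_eq (c : String) :
    (PySem.Dict.ofList [("red", 12), ("green", 13), ("blue", 14)] : PySem.Dict String Int).getD c 0
      = pvLimit c := by
  have hd : (PySem.Dict.ofList [("red", 12), ("green", 13), ("blue", 14)] :
      PySem.Dict String Int)
      = ((PySem.Dict.empty.insert "red" 12).insert "green" 13).insert "blue" 14 := by rfl
  rw [hd]
  simp only [PySem.Dict.getD_insert, PySem.Dict.getD_empty, pvLimit, beq_iff_eq]
  by_cases h1 : c = "red" <;> by_cases h2 : c = "green" <;> by_cases h3 : c = "blue" <;>
    simp_all

theorem pv_hand_eq (hand : List (String × Int)) :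
    pvHandOk hand
      = (hand.map (fun ci =>
          decide (ci.2 ≤ (PySem.Dict.ofList [("red", 12), ("green", 13), ("blue", 14)] :
            PySem.Dict String Int).getD ci.1 0))).all id := by
  induction hand with
  | nil => rfl
  | cons ci rest ih =>
    simp only [pvHandOk, List.map_cons, List.all_cons, pv_limit_eq, id_eq, ih]
    by_cases h : ci.2 > pvLimit ci.1
    · simp [h, not_le.mpr h]
    · simp [h, not_lt.mp h]

theorem pv_game_eq (game : List (List (String × Int))) :
    pvGameOk game
      = (game.flatMap (fun hand => hand.map (fun ci =>
          decide (ci.2 ≤ (PySem.Dict.ofList [("red", 12), ("green", 13), ("blue", 14)] :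
            PySem.Dict String Int).getD ci.1 0)))).all id := by
  induction game with
  | nil => rfl
  | cons hand rest ih =>
    simp only [pvGameOk, List.flatMap_cons, List.all_append, ← pv_hand_eq, ih]
    cases pvHandOk hand <;> simp

theorem pv_go_eq (l : List (List (List (String × Int)))) (i s : Int) :
    ((PySem.List.enumerate l i).filter (fun p => pvGameOk p.2)).foldl (fun s p => s + p.1) s
      = s + pvGo l i := by
  induction l generalizing i s with
  | nil => simp [PySem.List.enumerate_nil, pvGo]
  | cons g t ih =>
    simp only [PySem.List.enumerate_cons, List.filter_cons, pvGo]
    by_cases h : pvGameOk g = true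
    · simp only [h, if_true, List.foldl_cons, ih]; ring
    · simp only [h, Bool.false_eq_true, if_false, ih]

-- ===== VERDICT (by name: the statement is the Claim_ definition above) =====
theorem task01_spec : Claim_equal_task01 := by
  intro data _ _
  show task01 data = task01_alt data
  unfold task01 task01_alt
  have hfun : ∀ p : Int × List (List (String × Int)),
      ((p.2.flatMap (fun hand => hand.map (fun ci =>
        decide (ci.2 ≤ (PySem.Dict.ofList [("red", 12), ("green", 13), ("blue", 14)] :
          PySem.Dict String Int).getD ci.1 0)))).all id) = pvGameOk p.2 :=
    fun p => (pv_game_eq p.2).symm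
  calc ((PySem.List.enumerate data 1).filter (fun p =>
          (p.2.flatMap (fun hand => hand.map (fun ci =>
            decide (ci.2 ≤ (PySem.Dict.ofList [("red", 12), ("green", 13), ("blue", 14)] :
              PySem.Dict String Int).getD ci.1 0)))).all id)).foldl (fun s p => s + p.1) 0
      = ((PySem.List.enumerate data 1).filter (fun p => pvGameOk p.2)).foldl
          (fun s p => s + p.1) 0 := by
        rw [List.filter_congr (fun p _ => hfun p)]
    _ = 0 + pvGo data 1 := pv_go_eq data 1 0
    _ = pvGo data 1 := by ring
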